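-- pv_equiv track=rewrite | github.com/bj0key/snuscode | encode.py | snus_rev2_rle
-- ===== SOURCE A (Python) =====
-- def snus_rev2(msg):
--     """encode to revision 2 snuscode"""
--     enc_int = sum([ord(c)<<(i*7) for i,c in enumerate(msg[::-1])])
--     enc = "ssss"
--     while enc_int != 0:
--         enc_int, rem = divmod(enc_int, 3)
--         enc += "snu"[rem]
--     return enc
--
-- def snus_rev2_rle(msg):
--     """Encode to rev2 snus, but then perform
--        a primitie RLE using exclusively s, n, and u"""
--     rev2 = snus_rev2(msg)[4:] # remove the "ssss" from the beginning (redundant)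
--     last_char = None
--     run_length = 0 #run length
--     enc = "sssS"
--     for c in rev2:
--         if run_length>3 or (last_char!=c and last_char!=None):
--             enc += last_char
--             if run_length>2: enc+="SNU"[run_length-3]
--             elif run_length == 2: enc+=last_char
--             run_length = 0
--         last_char = c
--         run_length+=1
--     enc += last_char
--     if run_length>2: enc+="SNU"[run_length-3]
--     elif run_length == 2: enc+=last_char
--     return enc
-- ===== SOURCE B (Python) =====
-- def snus_rev2_rle(msg):
--     """Encode to rev2 snus with primitive RLE: Horner big-int build,
--        divide-and-conquer base-3 conversion, then run-grouped RLE."""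
--     n = 0
--     for c in msg:
--         n = n * 128 + ord(c)
--     digs = []
--     if n:
--         # powers 3^(2^j), descending list for the recursion
--         pows = [3]
--         while pows[-1] * pows[-1] <= n:
--             pows.append(pows[-1] * pows[-1])
--         pows.reverse()
--
--         def rec(m, ps):
--             if not ps:
--                 digs.append("snu"[m])
--             else:
--                 q, r = divmod(m, ps[0])
--                 rec(r, ps[1:])
--                 rec(q, ps[1:])
--
--         rec(n, pows)
--         while digs and digs[-1] == 's':
--             digs.pop()
--     # RLE: split into runs, emit each run in chunks of at most 4
--     out = ["sssS"]
--     i = 0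
--     L = len(digs)
--     while i < L:
--         j = i + 1
--         while j < L and digs[j] == digs[i]:
--             j += 1
--         run = j - i
--         c = digs[i]
--         while run > 0:
--             t = run if run < 4 else 4
--             out.append(c)
--             if t >= 3:
--                 out.append("SNU"[t - 3])
--             elif t == 2:
--                 out.append(c)
--             run -= t
--         i = j
--     return "".join(out)
-- ===== Notes on version B (the rewrite author's own statement) =====
-- stated objective: faster
-- what changed: B builds the big integer by a Horner fold instead of the enumerate/shift sum, converts it to base-3 by divide-and-conquer on precomputed squared powers of 3 instead of one divmod per digit, and does the RLE by splitting the digit list into runs and emitting each run in chunks of at most 4, instead of A's stateful per-character flush loop.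
import Mathlib
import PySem

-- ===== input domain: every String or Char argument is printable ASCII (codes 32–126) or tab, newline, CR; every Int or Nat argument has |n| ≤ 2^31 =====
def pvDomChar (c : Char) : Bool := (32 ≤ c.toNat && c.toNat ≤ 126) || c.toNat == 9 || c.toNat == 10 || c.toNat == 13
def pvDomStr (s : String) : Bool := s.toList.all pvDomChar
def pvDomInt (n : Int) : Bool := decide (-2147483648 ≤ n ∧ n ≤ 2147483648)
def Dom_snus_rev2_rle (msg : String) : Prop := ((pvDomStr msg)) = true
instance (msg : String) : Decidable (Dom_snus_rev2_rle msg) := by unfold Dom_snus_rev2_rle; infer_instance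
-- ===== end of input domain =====

-- B replaces A's one-digit-at-a-time base-3 extraction by a Horner accumulation,
-- divide-and-conquer conversion over squared powers of 3, and a run-grouped RLE (objective: faster).

-- ===== PORT A =====
-- "snu"[r] / "SNU"[r]; in A these are only evaluated at r ∈ {0,1,2} resp. {0,1}, where pyGet? is some
def snuChar (r : Int) : Char := (PySem.List.pyGet? ['s','n','u'] r).getD ' '
def sNUChar (r : Int) : Char := (PySem.List.pyGet? ['S','N','U'] r).getD ' '

-- while enc_int != 0: enc_int, rem = divmod(enc_int, 3); enc += "snu"[rem]
-- (guard 0 < n: A's enc_int is a sum of non-negative terms, and Python diverges on negative n)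
def snusRev2Loop (n : Int) (acc : List Char) : List Char :=
  if 0 < n then
    snusRev2Loop (PySem.Int.floordiv n 3) (acc ++ [snuChar (PySem.Int.mod n 3)])
  else acc
termination_by n.toNat
decreasing_by
  have h3 : PySem.Int.floordiv n 3 = n / 3 := PySem.Int.floordiv_eq_ediv_of_pos (by omega)
  rw [h3]; omega

-- enc_int = sum([ord(c)<<(i*7) for i,c in enumerate(msg[::-1])])  (i ≥ 0, so i.toNat is exact)
def snusEncInt (msg : String) : Int :=
  ((PySem.List.enumerate ((PySem.List.slice? msg.toList none none (-1)).getD []) 0).map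
     (fun ic => ((ic.2.toNat : Int)) <<< (ic.1.toNat * 7))).sum

def snusRev2 (msg : String) : List Char :=
  snusRev2Loop (snusEncInt msg) ['s','s','s','s']

-- the loop body: st = (last_char, run_length, enc)
def rleStepA (st : Option Char × Int × List Char) (c : Char) : Option Char × Int × List Char :=
  let last := st.1
  let run := st.2.1
  let enc := st.2.2
  if 3 < run ∨ (last ≠ some c ∧ last ≠ none) then
    -- Python: enc += last_char; last ≠ none whenever this branch runs, so getD is exact
    (some c, 1,
      (enc ++ [last.getD ' ']) ++
        (if 2 < run then [sNUChar (run - 3)]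
         else if run = 2 then [last.getD ' ']
         else []))
  else (some c, run + 1, enc)

def snus_rev2_rle (msg : String) : String :=
  let rev2 := PySem.List.slice (snusRev2 msg) (some 4) none
  let st := rev2.foldl rleStepA (none, 0, ['s','s','s','S'])
  -- final flush: Python's enc += last_char raises TypeError iff st.1 = none (msg = ""), excluded by Pre_
  String.ofList ((st.2.2 ++ [st.1.getD ' ']) ++
    (if 2 < st.2.1 then [sNUChar (st.2.1 - 3)]
     else if st.2.1 = 2 then [st.1.getD ' ']
     else []))

-- ===== PORT B =====
def hornerB (msg : String) : Int :=
  msg.toList.foldl (fun n c => n * 128 + (c.toNat : Int)) 0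

-- while pows[-1]*pows[-1] <= n: append square; then reverse — consing builds the reversed list directly
-- (guard 2 ≤ p is only for totality; the loop starts at p = 3 and p only grows)
def buildPowsB (n p : Int) (acc : List Int) : List Int :=
  if h : 2 ≤ p ∧ p * p ≤ n then buildPowsB n (p * p) (p * p :: acc) else acc
termination_by (n + 1 - p).toNat
decreasing_by
  have : p < p * p := by nlinarith [h.1]
  omega

def dcRec (m : Int) : List Int → List Char
  | [] => [snuChar m]
  | p :: ps => dcRec (PySem.Int.mod m p) ps ++ dcRec (PySem.Int.floordiv m p) ps

-- while digs and digs[-1] == 's': digs.pop()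
def stripS (l : List Char) : List Char := (l.reverse.dropWhile (· == 's')).reverse

-- 'if n:' — n is the Horner value, which is ≥ 0 on every input, so the test is 0 < n
def digitsB (n : Int) : List Char :=
  if 0 < n then stripS (dcRec n (buildPowsB n 3 [3])) else []

def emitRunB (c : Char) (run : Nat) : List Char :=
  if 0 < run then
    let t := if run < 4 then run else 4
    (if 3 ≤ t then [c, sNUChar ((t : Int) - 3)]
     else if t = 2 then [c, c] else [c]) ++ emitRunB c (run - t)
  else []
termination_by run
decreasing_by
  rename_i h
  split <;> omega

def groupsB : List Char → List (Char × Nat)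
  | [] => []
  | c :: rest =>
    (c, (rest.takeWhile (· == c)).length + 1) :: groupsB (rest.dropWhile (· == c))
termination_by l => l.length
decreasing_by
  have := List.length_dropWhile_le (p := (· == c)) (l := rest)
  simp; omega

def snus_rev2_rle_alt (msg : String) : String :=
  String.ofList (['s','s','s','S'] ++
    (groupsB (digitsB (hornerB msg))).flatMap (fun g => emitRunB g.1 g.2))

-- ===== PRECONDITION & SPEC =====
-- A raises TypeError on the empty string (enc += last_char with last_char still None)
def Pre_snus_rev2_rle (msg : String) : Prop := msg ≠ ""
instance (msg : String) : Decidable (Pre_snus_rev2_rle msg) := by unfold Pre_snus_rev2_rle; infer_instance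
def pvWitness_snus_rev2_rle : String := "a"

def Spec_snus_rev2_rle (msg : String) (out : String) : Prop := out = snus_rev2_rle_alt msg
instance (msg : String) (out : String) : Decidable (Spec_snus_rev2_rle msg out) := by unfold Spec_snus_rev2_rle; infer_instance

-- ===== CLAIM (what is proved, stated in full; the proofs are below) =====
def Claim_equal_snus_rev2_rle : Prop := ∀ (msg : String), Dom_snus_rev2_rle msg → Pre_snus_rev2_rle msg → Spec_snus_rev2_rle msg (snus_rev2_rle msg)

-- ===== LEMMAS AND PROOFS =====

-- the base-3 digit characters, on the Nat side
def d3 (d : Nat) : Char := if d = 0 then 's' else if d = 1 then 'n' else 'u'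

-- the common big-integer value, on the Nat side
def natVal (l : List Char) : Nat := l.foldl (fun n c => n * 128 + c.toNat) 0

-- the same value, little-endian over the reversed list (A's summation order)
def base (l : List Char) : Int :=
  match l with
  | [] => 0
  | c :: cs => (c.toNat : Int) + 128 * base cs

def pexp (j : Nat) : Nat := 3 ^ (2 ^ j)

def powChain : Nat → List Int
  | 0 => []
  | k + 1 => ((pexp k : Nat) : Int) :: powChain k

-- exactly-L base-3 digits (little-endian, zero-padded)
def padDig : Nat → Nat → List Nat
  | 0, _ => []
  | L + 1, m => m % 3 :: padDig L (m / 3)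

-- A's final flush, as a function of the fold state
def finishA (st : Option Char × Int × List Char) : List Char :=
  (st.2.2 ++ [st.1.getD ' ']) ++
    (if 2 < st.2.1 then [sNUChar (st.2.1 - 3)]
     else if st.2.1 = 2 then [st.1.getD ' ']
     else [])

def chunk4s (c : Char) (k : Nat) : List Char := (List.replicate k [c, 'N']).flatten

def chunkEnc (c : Char) (ρ : Nat) : List Char :=
  if ρ = 2 then [c, c] else if ρ = 3 then [c, 'S'] else if ρ = 4 then [c, 'N'] else [c]

theorem enumSum (r : List Char) : ∀ (s : Nat),
    ((PySem.List.enumerate r (s : Int)).map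
      (fun ic => ((ic.2.toNat : Int)) <<< (ic.1.toNat * 7))).sum = 2 ^ (7 * s) * base r := by
  induction r with
  | nil => intro s; simp [PySem.List.enumerate_nil, base]
  | cons c cs ih =>
    intro s
    rw [PySem.List.enumerate_cons]
    have hs : ((s : Int)) + 1 = (((s + 1 : Nat)) : Int) := by push_cast; ring
    simp only [List.map_cons, List.sum_cons, hs, ih (s + 1), base]
    have hsh : ((c.toNat : Int)) <<< ((((((s : Int)).toNat : Nat) : Int)) * 7) = (c.toNat : Int) * 2 ^ (7 * s) := by
      rw [show (((((s : Int)).toNat : Nat)) : Int) * 7 = ((((((s : Int)).toNat * 7 : Nat)) : Int)) by push_cast; ring]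
      rw [Int.shiftLeft_eq_mul_pow]
      push_cast
      rw [show (s:Int).toNat * 7 = 7 * s by omega]
    have h2 : ((2:Int)) ^ (7 * (s+1)) = 2 ^ (7 * s) * 128 := by
      rw [show 7 * (s+1) = 7 * s + 7 by ring, pow_add]; norm_num
    rw [hsh, h2]
    ring

theorem foldl_horner (l : List Char) : ∀ (a : Nat),
    l.foldl (fun n c => n * 128 + c.toNat) a = a * 128 ^ l.length + natVal l := by
  induction l with
  | nil => intro a; simp [natVal]
  | cons c cs ih =>
    intro a
    have h1 : (c :: cs).foldl (fun n c => n * 128 + c.toNat) a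
        = cs.foldl (fun n c => n * 128 + c.toNat) (a * 128 + c.toNat) := by
      simp
    have h2 : natVal (c :: cs) = c.toNat * 128 ^ cs.length + natVal cs := by
      show (c :: cs).foldl (fun n c => n * 128 + c.toNat) 0 = _
      rw [List.foldl_cons, ih]
      ring_nf
    rw [h1, ih, h2, List.length_cons]
    ring

theorem natVal_base (l : List Char) : (natVal l : Int) = base l.reverse := by
  induction l using List.reverseRecOn with
  | nil => simp [natVal, base]
  | append_singleton l c ih =>
    have h1 : natVal (l ++ [c]) = natVal l * 128 + c.toNat := by
      simp [natVal, List.foldl_append]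
    rw [h1, List.reverse_append]
    simp only [List.reverse_cons, List.reverse_nil, List.nil_append, List.cons_append, base]
    push_cast
    rw [← ih]
    ring

theorem encInt_eq (msg : String) : snusEncInt msg = (natVal msg.toList : Int) := by
  unfold snusEncInt
  rw [PySem.List.slice?_none_none_neg_one]
  have := enumSum msg.toList.reverse 0
  norm_num at this ⊢
  rw [this, natVal_base]

theorem loopA_eq (N : Nat) : ∀ (acc : List Char),
    snusRev2Loop (N : Int) acc = acc ++ (Nat.digits 3 N).map d3 := by
  induction N using Nat.strong_induction_on with
  | _ N ih =>
    intro acc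
    rw [snusRev2Loop]
    by_cases hN : 0 < N
    · have hpos : (0:Int) < (N:Int) := by exact_mod_cast hN
      rw [if_pos hpos]
      have hf : PySem.Int.floordiv (N : Int) 3 = ((N / 3 : Nat) : Int) := by
        exact_mod_cast PySem.Int.floordiv_natCast N 3
      have hm : PySem.Int.mod (N : Int) 3 = ((N % 3 : Nat) : Int) := by
        exact_mod_cast PySem.Int.mod_natCast N 3
      rw [hf, hm, ih (N / 3) (by omega)]
      have hd : Nat.digits 3 N = N % 3 :: Nat.digits 3 (N / 3) := Nat.digits_def' (by norm_num) hN
      rw [hd]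
      have hc : snuChar ((N % 3 : Nat) : Int) = d3 (N % 3) := by
        have : N % 3 = 0 ∨ N % 3 = 1 ∨ N % 3 = 2 := by omega
        rcases this with h | h | h <;> rw [h] <;> decide
      rw [hc]
      simp
    · have h0 : N = 0 := by omega
      subst h0
      norm_num

theorem pexp_succ (j : Nat) : pexp (j + 1) = pexp j * pexp j := by
  unfold pexp
  rw [show 2 ^ (j + 1) = 2 ^ j + 2 ^ j by ring, pow_add]

theorem pexp_ge (j : Nat) : 3 ≤ pexp j := by
  unfold pexp
  calc (3:Nat) = 3 ^ 1 := by norm_num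
  _ ≤ 3 ^ (2 ^ j) := Nat.pow_le_pow_right (by norm_num) (Nat.one_le_two_pow)

theorem build_aux (n : Int) : ∀ (p : Int) (acc : List Int) (j : Nat),
    p = ((pexp j : Nat) : Int) → acc = powChain (j + 1) →
    ∃ K, j ≤ K ∧ buildPowsB n p acc = powChain (K + 1) ∧ n < ((pexp (K + 1) : Nat) : Int) := by
  intro p acc
  induction p, acc using buildPowsB.induct n with
  | case1 p acc h ih =>
    intro j hp hacc
    rw [buildPowsB, dif_pos h]
    have hpp : p * p = ((pexp (j + 1) : Nat) : Int) := by
      rw [hp, pexp_succ]; push_cast; ring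
    obtain ⟨K, hK, hres, hbound⟩ := ih (j + 1) hpp (by rw [hacc, hpp]; rfl)
    exact ⟨K, by omega, hres, hbound⟩
  | case2 p acc h =>
    intro j hp hacc
    rw [buildPowsB, dif_neg h]
    refine ⟨j, le_refl j, hacc, ?_⟩
    have h2 : 2 ≤ p := by
      rw [hp]
      have := pexp_ge j
      exact_mod_cast by omega
    have hnb : ¬ (p * p ≤ n) := fun hc => h ⟨h2, hc⟩
    have : n < p * p := by omega
    calc n < p * p := this
    _ = ((pexp (j + 1) : Nat) : Int) := by rw [hp, pexp_succ]; push_cast; ring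

theorem padDig_split (s : Nat) : ∀ (t m : Nat),
    padDig (s + t) m = padDig s m ++ padDig t (m / 3 ^ s) := by
  induction s with
  | zero => intro t m; simp [padDig]
  | succ s ih =>
    intro t m
    rw [show s + 1 + t = (s + t) + 1 by ring]
    show (m % 3) :: padDig (s + t) (m / 3) = ((m % 3) :: padDig s (m / 3)) ++ padDig t (m / 3 ^ (s+1))
    rw [ih t (m / 3), Nat.div_div_eq_div_mul, List.cons_append]
    congr 3
    rw [pow_succ]
    ring

theorem padDig_mod (s : Nat) : ∀ (m : Nat), padDig s (m % 3 ^ s) = padDig s m := by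
  induction s with
  | zero => intro m; simp [padDig]
  | succ s ih =>
    intro m
    show (m % 3 ^ (s+1)) % 3 :: padDig s ((m % 3 ^ (s+1)) / 3) = m % 3 :: padDig s (m / 3)
    have h1 : (m % 3 ^ (s+1)) % 3 = m % 3 := by
      rw [Nat.mod_mod_of_dvd]
      exact dvd_pow_self 3 (by omega)
    have h2 : (m % 3 ^ (s+1)) / 3 = (m / 3) % 3 ^ s := by
      rw [pow_succ, mul_comm]
      exact Nat.mod_mul_right_div_self m 3 (3 ^ s)
    rw [h1, h2, ih]

theorem snuChar_eq_d3 (m : Nat) (hm : m < 3) : snuChar ((m : Nat) : Int) = d3 m := by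
  interval_cases m <;> decide

theorem dc_spec : ∀ (k : Nat) (m : Nat), m < pexp k →
    dcRec ((m : Nat) : Int) (powChain k) = (padDig (2 ^ k) m).map d3 := by
  intro k
  induction k with
  | zero =>
    intro m hm
    show [snuChar ((m : Nat) : Int)] = (padDig 1 m).map d3
    rw [snuChar_eq_d3 m (by simpa [pexp] using hm)]
    show _ = [d3 (m % 3)]
    rw [Nat.mod_eq_of_lt (by simpa [pexp] using hm)]
  | succ k ih =>
    intro m hm
    show dcRec _ (((pexp k : Nat) : Int) :: powChain k) = _
    show dcRec (PySem.Int.mod ((m:Nat):Int) ((pexp k : Nat) : Int)) (powChain k) ++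
         dcRec (PySem.Int.floordiv ((m:Nat):Int) ((pexp k : Nat) : Int)) (powChain k) = _
    have hmod : PySem.Int.mod ((m:Nat):Int) ((pexp k : Nat) : Int) = ((m % pexp k : Nat) : Int) :=
      PySem.Int.mod_natCast m (pexp k)
    have hdiv : PySem.Int.floordiv ((m:Nat):Int) ((pexp k : Nat) : Int) = ((m / pexp k : Nat) : Int) :=
      PySem.Int.floordiv_natCast m (pexp k)
    have hp0 : 0 < pexp k := by have := pexp_ge k; omega
    have hb1 : m % pexp k < pexp k := Nat.mod_lt _ hp0
    have hb2 : m / pexp k < pexp k := by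
      rw [Nat.div_lt_iff_lt_mul hp0]
      calc m < pexp (k+1) := hm
      _ = pexp k * pexp k := pexp_succ k
    rw [hmod, hdiv, ih _ hb1, ih _ hb2]
    have hsplit : padDig (2 ^ (k+1)) m = padDig (2 ^ k) m ++ padDig (2 ^ k) (m / 3 ^ (2 ^ k)) := by
      rw [show (2:Nat) ^ (k+1) = 2 ^ k + 2 ^ k by ring]
      exact padDig_split (2 ^ k) (2 ^ k) m
    have hpe : (3:Nat) ^ (2 ^ k) = pexp k := rfl
    rw [hsplit, hpe, List.map_append, ← padDig_mod (2^k) m]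
    rfl

theorem padDig_zero (L : Nat) : padDig L 0 = List.replicate L 0 := by
  induction L with
  | zero => rfl
  | succ L ih =>
    show (0 % 3) :: padDig L (0 / 3) = _
    rw [List.replicate_succ]
    simpa using ih

theorem padDig_eq_digits (L : Nat) : ∀ (m : Nat), m < 3 ^ L →
    padDig L m = Nat.digits 3 m ++ List.replicate (L - (Nat.digits 3 m).length) 0 := by
  induction L with
  | zero => intro m hm; interval_cases m; simp [padDig]
  | succ L ih =>
    intro m hm
    by_cases h0 : m = 0
    · subst h0; simp [padDig_zero]
    · have hpos : 0 < m := by omega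
      have hd : Nat.digits 3 m = m % 3 :: Nat.digits 3 (m / 3) := Nat.digits_def' (by norm_num) hpos
      have hdiv : m / 3 < 3 ^ L := by
        rw [Nat.div_lt_iff_lt_mul (by norm_num)]
        calc m < 3 ^ (L + 1) := hm
        _ = 3 ^ L * 3 := by rw [pow_succ]
      show m % 3 :: padDig L (m / 3) = _
      rw [hd, ih (m / 3) hdiv]
      simp [List.cons_append]

theorem d3_ne_s (d : Nat) (hd : d ≠ 0) : (d3 d == 's') = false := by
  unfold d3
  split
  · omega
  · split <;> decide

theorem strip_pad (m t : Nat) (hm : 0 < m) :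
    stripS ((Nat.digits 3 m).map d3 ++ List.replicate t 's') = (Nat.digits 3 m).map d3 := by
  have hne : Nat.digits 3 m ≠ [] := Nat.digits_ne_nil_iff_ne_zero.mpr (by omega)
  obtain ⟨l', a, hla⟩ := (List.eq_nil_or_concat (Nat.digits 3 m)).resolve_left hne
  have hla' : Nat.digits 3 m = l' ++ [a] := by simpa using hla
  have hlast? : (Nat.digits 3 m).getLast? = some a := by rw [hla']; simp
  have hgl : (Nat.digits 3 m).getLast hne = a := by
    have h2 := List.getLast?_eq_some_getLast (l := Nat.digits 3 m) hne
    rw [hlast?] at h2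
    exact (Option.some_injective _ h2).symm
  have ha : a ≠ 0 := hgl ▸ Nat.getLast_digit_ne_zero 3 (show m ≠ 0 by omega)
  unfold stripS
  rw [List.reverse_append, List.reverse_replicate, hla']
  have hdropRep : ∀ (l : List Char),
      List.dropWhile (· == 's') (List.replicate t 's' ++ l) = List.dropWhile (· == 's') l := by
    intro l
    induction t with
    | zero => simp
    | succ t iht => simpa using iht
  rw [hdropRep, List.map_append, List.reverse_append,
    show List.reverse (List.map d3 [a]) = [d3 a] from rfl, List.singleton_append,
    List.dropWhile_cons_of_neg (by simp [d3_ne_s a ha])]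
  rw [List.reverse_cons, List.reverse_reverse]
  rfl

theorem digitsB_eq (N : Nat) (hN : 0 < N) :
    digitsB ((N : Nat) : Int) = (Nat.digits 3 N).map d3 := by
  unfold digitsB
  rw [if_pos (by exact_mod_cast hN)]
  have h3 : ((3:Int)) = ((pexp 0 : Nat) : Int) := by norm_num [pexp]
  have hc : ([((pexp 0 : Nat) : Int)]) = powChain 1 := rfl
  rw [h3, hc]
  obtain ⟨K, _, hres, hbound⟩ := build_aux ((N : Nat) : Int) _ _ 0 rfl rfl
  rw [hres]
  have hNb : N < pexp (K + 1) := by exact_mod_cast hbound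
  rw [dc_spec (K + 1) N hNb]
  have hpad := padDig_eq_digits (2 ^ (K + 1)) N (by simpa [pexp] using hNb)
  rw [hpad, List.map_append]
  have hrep : (List.replicate (2 ^ (K+1) - (Nat.digits 3 N).length) 0).map d3
      = List.replicate (2 ^ (K+1) - (Nat.digits 3 N).length) 's' := by
    rw [List.map_replicate]; rfl
  rw [hrep, strip_pad N _ hN]

theorem chunk4s_succ (c : Char) (k : Nat) : chunk4s c (k + 1) = [c, 'N'] ++ chunk4s c k := by
  simp [chunk4s, List.replicate_succ]

theorem runLemma (c : Char) : ∀ (j r : Nat) (e : List Char), 1 ≤ r → r ≤ 4 →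
    List.foldl rleStepA (some c, ((r : Nat) : Int), e) (List.replicate j c)
      = (some c, (((r - 1 + j) % 4 + 1 : Nat) : Int), e ++ chunk4s c ((r - 1 + j) / 4)) := by
  intro j
  induction j with
  | zero =>
    intro r e h1 h4
    simp only [List.replicate, List.foldl_nil, Nat.add_zero]
    rw [Nat.mod_eq_of_lt (by omega), Nat.div_eq_of_lt (by omega)]
    have : r - 1 + 1 = r := by omega
    rw [this]
    simp [chunk4s]
  | succ j ih =>
    intro r e h1 h4
    rw [List.replicate_succ, List.foldl_cons]
    by_cases hr : r ≤ 3
    · have hstep : rleStepA (some c, ((r : Nat) : Int), e) c = (some c, (((r + 1 : Nat)) : Int), e) := by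
        unfold rleStepA
        dsimp only
        rw [if_neg]
        · show (some c, ((r : Nat) : Int) + 1, e) = _
          norm_num
        · rintro (h3 | ⟨hne, _⟩)
          · have hcast : ((r : Nat) : Int) ≤ 3 := by exact_mod_cast hr
            omega
          · exact hne rfl
      rw [hstep, ih (r + 1) e (by omega) (by omega)]
      have h1' : r + 1 - 1 + j = r - 1 + (j + 1) := by omega
      rw [h1']
    · have hr4 : r = 4 := by omega
      subst hr4
      have hstep : rleStepA (some c, ((4 : Nat) : Int), e) c
          = (some c, ((1 : Nat) : Int), e ++ [c, 'N']) := by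
        unfold rleStepA
        dsimp only
        rw [if_pos (by left; norm_num)]
        rw [if_pos (by norm_num)]
        have hsnu : sNUChar (((4 : Nat) : Int) - 3) = 'N' := by norm_num; decide
        rw [hsnu]
        simp
      rw [hstep, ih 1 (e ++ [c, 'N']) (by omega) (by omega)]
      have hm : 1 - 1 + j = j := by omega
      have hm2 : (4 - 1 + (j + 1)) % 4 = j % 4 := by omega
      have hm3 : (4 - 1 + (j + 1)) / 4 = j / 4 + 1 := by omega
      rw [hm, hm2, hm3, chunk4s_succ]
      simp

theorem sNU_ρ (ρ : Nat) (h1 : 1 ≤ ρ) (h4 : ρ ≤ 4) (c : Char) (E : List Char) :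
    (E ++ [c]) ++
      (if 2 < ((ρ : Nat) : Int) then [sNUChar (((ρ : Nat) : Int) - 3)]
       else if ((ρ : Nat) : Int) = 2 then [c] else []) = E ++ chunkEnc c ρ := by
  interval_cases ρ <;> norm_num [chunkEnc] <;> decide

theorem finish_chunk (c : Char) (ρ : Nat) (h1 : 1 ≤ ρ) (h4 : ρ ≤ 4) (E : List Char) :
    finishA (some c, ((ρ : Nat) : Int), E) = E ++ chunkEnc c ρ := by
  unfold finishA
  dsimp only
  exact sNU_ρ ρ h1 h4 c E

theorem stepFlushDiff (c c' : Char) (hne : c ≠ c') (ρ : Nat) (h1 : 1 ≤ ρ) (h4 : ρ ≤ 4) (E : List Char) :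
    rleStepA (some c, ((ρ : Nat) : Int), E) c'
      = (some c', ((1 : Nat) : Int), E ++ chunkEnc c ρ) := by
  unfold rleStepA
  dsimp only
  rw [if_pos (Or.inr ⟨by simpa using hne, by simp⟩)]
  rw [Prod.mk.injEq, Prod.mk.injEq]
  exact ⟨rfl, by norm_num, sNU_ρ ρ h1 h4 c E⟩

theorem chunks_emit (c : Char) : ∀ (T : Nat), 1 ≤ T →
    chunk4s c ((T - 1) / 4) ++ chunkEnc c ((T - 1) % 4 + 1) = emitRunB c T := by
  intro T
  induction T using Nat.strong_induction_on with
  | _ T ih =>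
    intro hT
    by_cases hle : T ≤ 4
    · have hd : (T - 1) / 4 = 0 := by omega
      have hm : (T - 1) % 4 + 1 = T := by omega
      rw [hd, hm]
      show chunkEnc c T = emitRunB c T
      rw [emitRunB]
      rw [if_pos (by omega)]
      interval_cases T
      · show chunkEnc c 1 = (if (3:Nat) ≤ 1 then _ else if (1:Nat) = 2 then _ else [c]) ++ emitRunB c (1 - 1)
        rw [if_neg (by omega), if_neg (by omega), emitRunB]
        simp [chunkEnc]
      · show chunkEnc c 2 = (if (3:Nat) ≤ 2 then _ else if (2:Nat) = 2 then _ else _) ++ emitRunB c (2 - 2)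
        rw [if_neg (by omega), if_pos rfl, emitRunB]
        simp [chunkEnc]
      · show chunkEnc c 3 = (if (3:Nat) ≤ 3 then [c, sNUChar (((3:Nat) : Int) - 3)] else _) ++ emitRunB c (3 - 3)
        rw [if_pos (by omega), emitRunB]
        simp [chunkEnc]
        decide
      · show chunkEnc c 4 = (if (3:Nat) ≤ 4 then [c, sNUChar (((4:Nat) : Int) - 3)] else _) ++ emitRunB c (4 - 4)
        rw [if_pos (by omega), emitRunB]
        simp [chunkEnc]
        decide
    · have h5 : 5 ≤ T := by omega
      rw [emitRunB, if_pos (by omega)]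
      have ht : (if T < 4 then T else 4) = 4 := by rw [if_neg (by omega)]
      dsimp only
      rw [ht, if_pos (by omega)]
      have hsnu : sNUChar (((4 : Nat) : Int) - 3) = 'N' := by norm_num; decide
      rw [hsnu]
      have hrec := ih (T - 4) (by omega) (by omega)
      have hd : (T - 1) / 4 = ((T - 4) - 1) / 4 + 1 := by omega
      have hm : (T - 1) % 4 = ((T - 4) - 1) % 4 := by omega
      rw [hd, hm, chunk4s_succ, ← hrec]
      simp

theorem takeWhile_rep (c : Char) (l : List Char) :
    l.takeWhile (· == c) = List.replicate (l.takeWhile (· == c)).length c := by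
  rw [List.eq_replicate_iff]
  exact ⟨rfl, fun b hb => by simpa using List.mem_takeWhile_imp hb⟩

theorem mainRLE : ∀ (n : Nat) (l : List Char) (c : Char) (e : List Char), l.length ≤ n →
    finishA (List.foldl rleStepA (some c, ((1 : Nat) : Int), e) l)
      = e ++ (groupsB (c :: l)).flatMap (fun g => emitRunB g.1 g.2) := by
  intro n
  induction n with
  | zero =>
    intro l c e hl
    have hnil : l = [] := List.length_eq_zero_iff.mp (by omega)
    subst hnil
    rw [List.foldl_nil, finish_chunk c 1 (by omega) (by omega)]
    have h0 : emitRunB c 0 = [] := by rw [emitRunB, if_neg (by omega)]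
    have h1 : emitRunB c 1 = [c] := by
      rw [emitRunB, if_pos (by omega)]
      norm_num
      exact h0
    have hgnil : groupsB ([] : List Char) = [] := by rw [groupsB]
    have hg : groupsB [c] = [(c, 1)] := by
      rw [groupsB]
      norm_num
      exact hgnil
    rw [hg, List.flatMap_cons, List.flatMap_nil, List.append_nil, h1]
    rfl
  | succ n ih =>
    intro l c e hl
    set j := (l.takeWhile (· == c)).length with hj
    have hsplit : l = List.replicate j c ++ l.dropWhile (· == c) := by
      conv_lhs => rw [← List.takeWhile_append_dropWhile (p := (· == c)) (l := l)]
      rw [← takeWhile_rep]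
    have hgroups : groupsB (c :: l) = (c, j + 1) :: groupsB (l.dropWhile (· == c)) := by
      rw [groupsB]
    have hjlen : j + (l.dropWhile (· == c)).length = l.length := by
      conv_rhs => rw [hsplit]
      simp
    rw [hsplit, List.foldl_append, runLemma c j 1 e (by omega) (by omega)]
    have hj0 : 1 - 1 + j = j := by omega
    rw [hj0]
    cases hdrop : l.dropWhile (· == c) with
    | nil =>
      rw [hdrop] at hsplit hgroups hjlen
      rw [List.foldl_nil, finish_chunk c (j % 4 + 1) (by omega) (by omega)]
      have hce := chunks_emit c (j + 1) (by omega)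
      simp only [Nat.add_sub_cancel] at hce
      rw [List.append_assoc, hce, ← hsplit, hgroups]
      have hgnil : groupsB ([] : List Char) = [] := by rw [groupsB]
      rw [hgnil, List.flatMap_cons, List.flatMap_nil, List.append_nil]
    | cons c' rest =>
      rw [hdrop] at hsplit hgroups hjlen
      have hcc' : ¬ (c' == c) = true := by
        have := List.head_dropWhile_not (· == c) (l := l) (by simp [hdrop])
        simpa [hdrop] using this
      have hcc : c ≠ c' := fun h => by simp [h] at hcc'
      rw [List.foldl_cons,
        stepFlushDiff c c' hcc (j % 4 + 1) (by omega) (by omega)]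
      rw [ih rest c' _ (by simp at hjlen; omega)]
      rw [← hsplit, hgroups, List.flatMap_cons]
      rw [List.append_assoc, List.append_assoc]
      congr 1
      have hce := chunks_emit c (j + 1) (by omega)
      simp only [Nat.add_sub_cancel] at hce
      rw [← List.append_assoc, hce]

theorem foldInt (l : List Char) : ∀ (a : Nat),
    l.foldl (fun n c => n * 128 + (c.toNat : Int)) ((a : Nat) : Int)
      = ((l.foldl (fun n c => n * 128 + c.toNat) a : Nat) : Int) := by
  induction l with
  | nil => intro a; simp
  | cons c cs ih =>
    intro a
    rw [List.foldl_cons, List.foldl_cons]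
    have : ((a : Nat) : Int) * 128 + (c.toNat : Int) = (((a * 128 + c.toNat : Nat)) : Int) := by
      push_cast; ring
    rw [this, ih]

theorem horner_eq (msg : String) : hornerB msg = (natVal msg.toList : Int) := by
  unfold hornerB natVal
  exact_mod_cast foldInt msg.toList 0

theorem natVal_pos (l : List Char) (hne : l ≠ []) (hd : l.all pvDomChar = true) :
    1 ≤ natVal l := by
  obtain ⟨c, cs, rfl⟩ := List.exists_cons_of_ne_nil hne
  have hc : pvDomChar c = true := by
    simp [List.all_cons] at hd
    exact hd.1
  have hc1 : 1 ≤ c.toNat := by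
    unfold pvDomChar at hc
    simp at hc
    omega
  have h1 : natVal (c :: cs) = c.toNat * 128 ^ cs.length + natVal cs := by
    show (c :: cs).foldl (fun n c => n * 128 + c.toNat) 0 = _
    rw [List.foldl_cons, foldl_horner]
    ring_nf
  have hp : 0 < 128 ^ cs.length := pow_pos (by norm_num) _
  have : c.toNat ≤ c.toNat * 128 ^ cs.length := Nat.le_mul_of_pos_right _ hp
  omega

theorem slice4 (X : List Char) :
    PySem.List.slice (['s','s','s','s'] ++ X) (some 4) none = X := by
  have h := PySem.List.slice_from (xs := ['s','s','s','s'] ++ X) (a := 4) (by norm_num)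
  rw [h]
  rfl

theorem step0 (x : Char) (S : List Char) :
    rleStepA (none, (0 : Int), S) x = (some x, ((1 : Nat) : Int), S) := by
  unfold rleStepA
  dsimp only
  have hcond : ¬ ((3:Int) < 0 ∨ ((none : Option Char) ≠ some x ∧ (none : Option Char) ≠ none)) := by
    rintro (h3 | ⟨_, hn⟩)
    · omega
    · exact hn rfl
  rw [if_neg hcond]
  norm_num

theorem portA_eq (msg : String) :
    snus_rev2_rle msg = String.ofList (finishA
      ((PySem.List.slice (snusRev2 msg) (some 4) none).foldl
        rleStepA (none, 0, ['s','s','s','S']))) := rfl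

-- ===== VERDICT (by name: the statement is the Claim_ definition above) =====
theorem snus_rev2_rle_spec : Claim_equal_snus_rev2_rle := by
  intro msg hdom hpre
  show snus_rev2_rle msg = snus_rev2_rle_alt msg
  have hlne : msg.toList ≠ [] := fun h => hpre (String.toList_eq_nil_iff.mp h)
  have hN : 1 ≤ natVal msg.toList := natVal_pos msg.toList hlne hdom
  have hdig : Nat.digits 3 (natVal msg.toList) ≠ [] :=
    Nat.digits_ne_nil_iff_ne_zero.mpr (by omega)
  obtain ⟨d, ds, hd⟩ := List.exists_cons_of_ne_nil hdig
  have hA : snusRev2 msg = ['s','s','s','s'] ++ (Nat.digits 3 (natVal msg.toList)).map d3 := by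
    unfold snusRev2
    rw [encInt_eq, loopA_eq]
  have hB : digitsB (hornerB msg) = (Nat.digits 3 (natVal msg.toList)).map d3 := by
    rw [horner_eq, digitsB_eq _ (by omega)]
  rw [portA_eq, hA, slice4, hd, List.map_cons, List.foldl_cons, step0,
    mainRLE (ds.map d3).length (ds.map d3) (d3 d) ['s','s','s','S'] (le_refl _)]
  unfold snus_rev2_rle_alt
  rw [hB, hd, List.map_cons]
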